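-- pv_equiv track=rewrite | github.com/Ljove02/AIT-AiTranscribe-MacOS | backend/batch_transcriber.py | lookup_chunk_duration
-- ===== SOURCE A (Python) =====
-- CHUNK_DURATION_TABLE = {
--     "parakeet-v2": {
--         # available_ram_mb: chunk_duration_seconds
--         256:  90,    # 1.5 minutes - very tight RAM
--         512:  120,   # 2 minutes
--         1024: 180,   # 3 minutes
--         2048: 300,   # 5 minutes
--         3072: 420,   # 7 minutes
--         4096: 600,   # 10 minutes
--         6144: 900,   # 15 minutes
--         8192: 1200,  # 20 minutes
--     },
--     "whisper-large-v3": {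
--         # Whisper Large v3 is ~4-6x slower than parakeet — keep chunks small
--         # (~120s) for responsive cancellation, stable RAM, and better quality.
--         # Each 120s chunk takes ~3-4 min to transcribe on M-series Macs.
--         256:  60,    # 1 minute
--         512:  90,    # 1.5 minutes
--         1024: 120,   # 2 minutes  (default for most configs)
--         2048: 120,   # 2 minutes  (cap here — bigger chunks don't help much)
--         3072: 120,   # 2 minutes
--         4096: 120,   # 2 minutes
--         6144: 150,   # 2.5 minutes
--         8192: 180,   # 3 minutes
--     },
--     "whisper-large-v3-turbo": {
--         # Turbo is faster than full v3 but slower than parakeet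
--         256:  90,    # 1.5 minutes
--         512:  120,   # 2 minutes
--         1024: 180,   # 3 minutes
--         2048: 300,   # 5 minutes
--         3072: 420,   # 7 minutes
--         4096: 600,   # 10 minutes
--         6144: 900,   # 15 minutes
--         8192: 1200,  # 20 minutes
--     },
-- }
--
-- def lookup_chunk_duration(available_ram_mb: int, model_id: str) -> int:
--     """
--     Look up the optimal chunk duration for a given available RAM and model.
--
--     Uses the closest lower entry in the lookup table.
--     Falls back to a conservative 120 seconds if model not in table.
--     """
--     table = CHUNK_DURATION_TABLE.get(model_id, CHUNK_DURATION_TABLE.get("parakeet-v2", {}))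
--
--     # Find the largest key that doesn't exceed available_ram_mb
--     best_duration = 120  # conservative default: 2 minutes
--     for ram_threshold, duration in sorted(table.items()):
--         if ram_threshold <= available_ram_mb:
--             best_duration = duration
--         else:
--             break
--
--     return best_duration
-- ===== SOURCE B (Python) =====
-- # B: presorted threshold list + hand-written binary search (bisect_right), instead of sort-and-scan-with-break.
-- _THRESHOLDS = [256, 512, 1024, 2048, 3072, 4096, 6144, 8192]
-- _DURATIONS = {
--     "parakeet-v2":            [90, 120, 180, 300, 420, 600, 900, 1200],
--     "whisper-large-v3":       [60, 90, 120, 120, 120, 120, 150, 180],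
--     "whisper-large-v3-turbo": [90, 120, 180, 300, 420, 600, 900, 1200],
-- }
--
-- def lookup_chunk_duration(available_ram_mb: int, model_id: str) -> int:
--     durations = _DURATIONS.get(model_id, _DURATIONS["parakeet-v2"])
--     lo, hi = 0, len(_THRESHOLDS)
--     while lo < hi:
--         mid = (lo + hi) // 2
--         if available_ram_mb < _THRESHOLDS[mid]:
--             hi = mid
--         else:
--             lo = mid + 1
--     return 120 if lo == 0 else durations[lo - 1]
-- ===== Notes on version B (the rewrite author's own statement) =====
-- stated objective: alternative
-- what changed: Replaces A's sort-then-linear-scan-with-break over the table items by a presorted threshold list with a hand-written binary search (bisect_right) that locates the largest threshold not exceeding available_ram_mb directly, then indexes a per-model duration list.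
import Mathlib
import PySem

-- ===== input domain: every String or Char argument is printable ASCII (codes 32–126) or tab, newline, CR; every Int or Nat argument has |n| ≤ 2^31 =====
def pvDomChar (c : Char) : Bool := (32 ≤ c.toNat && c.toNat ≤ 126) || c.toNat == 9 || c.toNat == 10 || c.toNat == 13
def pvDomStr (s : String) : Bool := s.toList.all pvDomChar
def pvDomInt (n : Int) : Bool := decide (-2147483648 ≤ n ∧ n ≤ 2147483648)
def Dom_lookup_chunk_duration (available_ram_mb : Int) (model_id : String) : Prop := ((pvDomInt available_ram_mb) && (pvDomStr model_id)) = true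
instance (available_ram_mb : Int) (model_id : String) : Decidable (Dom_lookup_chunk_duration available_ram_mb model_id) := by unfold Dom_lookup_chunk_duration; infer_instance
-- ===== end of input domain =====

-- B replaces A's sort-and-linear-scan-with-break by a binary search over the presorted thresholds (objective: simpler/alternative; no speed claim).

-- ===== PORT A =====
def pvTableParakeet : PySem.Dict Int Int :=
  PySem.Dict.ofList [(256, 90), (512, 120), (1024, 180), (2048, 300), (3072, 420), (4096, 600), (6144, 900), (8192, 1200)]
def pvTableV3 : PySem.Dict Int Int :=
  PySem.Dict.ofList [(256, 60), (512, 90), (1024, 120), (2048, 120), (3072, 120), (4096, 120), (6144, 150), (8192, 180)]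
def pvTableTurbo : PySem.Dict Int Int :=
  PySem.Dict.ofList [(256, 90), (512, 120), (1024, 180), (2048, 300), (3072, 420), (4096, 600), (6144, 900), (8192, 1200)]
def pvCHUNK_DURATION_TABLE : PySem.Dict String (PySem.Dict Int Int) :=
  PySem.Dict.ofList [("parakeet-v2", pvTableParakeet), ("whisper-large-v3", pvTableV3), ("whisper-large-v3-turbo", pvTableTurbo)]

-- the 'for … in sorted(table.items()): if … best = duration else break' loop, step for step
def pvLoopA (ram : Int) : List (Int × Int) → Int → Int
  | [], best => best
  | (k, d) :: rest, best => if k ≤ ram then pvLoopA ram rest d else best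

def lookup_chunk_duration (available_ram_mb : Int) (model_id : String) : Int :=
  let table := (PySem.Dict.get? pvCHUNK_DURATION_TABLE model_id).getD
      ((PySem.Dict.get? pvCHUNK_DURATION_TABLE "parakeet-v2").getD PySem.Dict.empty)
  -- sorted(table.items()): Python sorts the (key, value) tuples lexicographically = sorted2 with (fst, snd)
  pvLoopA available_ram_mb (PySem.List.sorted2 table.items Prod.fst Prod.snd) 120

-- ===== PORT B =====
def pvThresholds : List Int := [256, 512, 1024, 2048, 3072, 4096, 6144, 8192]
def pvDurationsDict : PySem.Dict String (List Int) :=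
  PySem.Dict.ofList [("parakeet-v2", [90, 120, 180, 300, 420, 600, 900, 1200]),
                     ("whisper-large-v3", [60, 90, 120, 120, 120, 120, 150, 180]),
                     ("whisper-large-v3-turbo", [90, 120, 180, 300, 420, 600, 900, 1200])]

-- Source B's hand-written while-loop binary search; _THRESHOLDS[mid] is always in range, getD's default
-- is never used; the fuel hi - lo (which strictly decreases each iteration) only makes the loop
-- structurally recursive and never runs out before lo = hi
def pvBisectGo (ram : Int) : Nat → Nat → Nat → Nat
  | 0, lo, _ => lo
  | Nat.succ n, lo, hi =>
    if lo < hi then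
      let mid := (lo + hi) / 2
      if ram < pvThresholds.getD mid 0 then pvBisectGo ram n lo mid else pvBisectGo ram n (mid + 1) hi
    else lo

def pvBisect (ram : Int) (lo hi : Nat) : Nat := pvBisectGo ram (hi - lo) lo hi

def lookup_chunk_duration_alt (available_ram_mb : Int) (model_id : String) : Int :=
  let durations := (PySem.Dict.get? pvDurationsDict model_id).getD
      ((PySem.Dict.get? pvDurationsDict "parakeet-v2").getD [])
  let lo := pvBisect available_ram_mb 0 pvThresholds.length
  if lo = 0 then 120 else durations.getD (lo - 1) 0

-- ===== PRECONDITION & SPEC =====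
def Spec_lookup_chunk_duration (available_ram_mb : Int) (model_id : String) (out : Int) : Prop := out = lookup_chunk_duration_alt available_ram_mb model_id
instance (available_ram_mb : Int) (model_id : String) (out : Int) : Decidable (Spec_lookup_chunk_duration available_ram_mb model_id out) := by unfold Spec_lookup_chunk_duration; infer_instance

-- ===== CLAIM (what is proved, stated in full; the proofs are below) =====
def Claim_equal_lookup_chunk_duration : Prop := ∀ (available_ram_mb : Int) (model_id : String), Dom_lookup_chunk_duration available_ram_mb model_id → Spec_lookup_chunk_duration available_ram_mb model_id (lookup_chunk_duration available_ram_mb model_id)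

-- ===== LEMMAS AND PROOFS =====

lemma pvBisectGo_leaf (ram : Int) (n m : Nat) : pvBisectGo ram n m m = m := by
  cases n <;> simp [pvBisectGo]

lemma pvBisectGo_node (ram : Int) (n lo hi mid t : Nat) (hlt : lo < hi)
    (hmid : (lo + hi) / 2 = mid) (ht : pvThresholds.getD mid 0 = t) :
    pvBisectGo ram (n + 1) lo hi =
      if ram < t then pvBisectGo ram n lo mid else pvBisectGo ram n (mid + 1) hi := by
  simp only [pvBisectGo, if_pos hlt, hmid, ht]

set_option maxHeartbeats 1000000 in
lemma pvBisect_eval (ram : Int) :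
    pvBisect ram 0 8 =
      if ram < 256 then 0 else if ram < 512 then 1 else if ram < 1024 then 2
      else if ram < 2048 then 3 else if ram < 3072 then 4 else if ram < 4096 then 5
      else if ram < 6144 then 6 else if ram < 8192 then 7 else 8 := by
  rw [show pvBisect ram 0 8 = pvBisectGo ram 8 0 8 from rfl]
  rw [pvBisectGo_node ram 7 0 8 4 3072 (by norm_num) (by norm_num) rfl]
  rw [pvBisectGo_node ram 6 0 4 2 1024 (by norm_num) (by norm_num) rfl]
  rw [pvBisectGo_node ram 6 5 8 6 6144 (by norm_num) (by norm_num) rfl]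
  rw [pvBisectGo_node ram 5 0 2 1 512 (by norm_num) (by norm_num) rfl]
  rw [pvBisectGo_node ram 5 3 4 3 2048 (by norm_num) (by norm_num) rfl]
  rw [pvBisectGo_node ram 5 5 6 5 4096 (by norm_num) (by norm_num) rfl]
  rw [pvBisectGo_node ram 5 7 8 7 8192 (by norm_num) (by norm_num) rfl]
  rw [pvBisectGo_node ram 4 0 1 0 256 (by norm_num) (by norm_num) rfl]
  simp only [pvBisectGo_leaf]
  split_ifs <;> omega

set_option maxHeartbeats 1000000 in
lemma pv_eq_on_table (ram d0 d1 d2 d3 d4 d5 d6 d7 : Int) :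
    pvLoopA ram [(256,d0),(512,d1),(1024,d2),(2048,d3),(3072,d4),(4096,d5),(6144,d6),(8192,d7)] 120 =
    (if pvBisect ram 0 pvThresholds.length = 0 then 120
     else List.getD [d0,d1,d2,d3,d4,d5,d6,d7] (pvBisect ram 0 pvThresholds.length - 1) 0) := by
  rw [show pvThresholds.length = 8 from rfl, pvBisect_eval]
  simp only [pvLoopA]
  by_cases h0 : ram < 256
  · rw [if_neg (show ¬ (256:Int) ≤ ram by omega), if_pos (show ram < (256:Int) by omega)]; norm_num [List.getD]
  by_cases h1 : ram < 512
  · rw [if_pos (show (256:Int) ≤ ram by omega), if_neg (show ¬ ram < (256:Int) by omega), if_neg (show ¬ (512:Int) ≤ ram by omega), if_pos (show ram < (512:Int) by omega)]; norm_num [List.getD]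
  by_cases h2 : ram < 1024
  · rw [if_pos (show (256:Int) ≤ ram by omega), if_neg (show ¬ ram < (256:Int) by omega), if_pos (show (512:Int) ≤ ram by omega), if_neg (show ¬ ram < (512:Int) by omega), if_neg (show ¬ (1024:Int) ≤ ram by omega), if_pos (show ram < (1024:Int) by omega)]; norm_num [List.getD]
  by_cases h3 : ram < 2048
  · rw [if_pos (show (256:Int) ≤ ram by omega), if_neg (show ¬ ram < (256:Int) by omega), if_pos (show (512:Int) ≤ ram by omega), if_neg (show ¬ ram < (512:Int) by omega), if_pos (show (1024:Int) ≤ ram by omega), if_neg (show ¬ ram < (1024:Int) by omega), if_neg (show ¬ (2048:Int) ≤ ram by omega), if_pos (show ram < (2048:Int) by omega)]; norm_num [List.getD]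
  by_cases h4 : ram < 3072
  · rw [if_pos (show (256:Int) ≤ ram by omega), if_neg (show ¬ ram < (256:Int) by omega), if_pos (show (512:Int) ≤ ram by omega), if_neg (show ¬ ram < (512:Int) by omega), if_pos (show (1024:Int) ≤ ram by omega), if_neg (show ¬ ram < (1024:Int) by omega), if_pos (show (2048:Int) ≤ ram by omega), if_neg (show ¬ ram < (2048:Int) by omega), if_neg (show ¬ (3072:Int) ≤ ram by omega), if_pos (show ram < (3072:Int) by omega)]; norm_num [List.getD]
  by_cases h5 : ram < 4096
  · rw [if_pos (show (256:Int) ≤ ram by omega), if_neg (show ¬ ram < (256:Int) by omega), if_pos (show (512:Int) ≤ ram by omega), if_neg (show ¬ ram < (512:Int) by omega), if_pos (show (1024:Int) ≤ ram by omega), if_neg (show ¬ ram < (1024:Int) by omega), if_pos (show (2048:Int) ≤ ram by omega), if_neg (show ¬ ram < (2048:Int) by omega), if_pos (show (3072:Int) ≤ ram by omega), if_neg (show ¬ ram < (3072:Int) by omega), if_neg (show ¬ (4096:Int) ≤ ram by omega), if_pos (show ram < (4096:Int) by omega)]; norm_num [List.getD]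
  by_cases h6 : ram < 6144
  · rw [if_pos (show (256:Int) ≤ ram by omega), if_neg (show ¬ ram < (256:Int) by omega), if_pos (show (512:Int) ≤ ram by omega), if_neg (show ¬ ram < (512:Int) by omega), if_pos (show (1024:Int) ≤ ram by omega), if_neg (show ¬ ram < (1024:Int) by omega), if_pos (show (2048:Int) ≤ ram by omega), if_neg (show ¬ ram < (2048:Int) by omega), if_pos (show (3072:Int) ≤ ram by omega), if_neg (show ¬ ram < (3072:Int) by omega), if_pos (show (4096:Int) ≤ ram by omega), if_neg (show ¬ ram < (4096:Int) by omega), if_neg (show ¬ (6144:Int) ≤ ram by omega), if_pos (show ram < (6144:Int) by omega)]; norm_num [List.getD]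
  by_cases h7 : ram < 8192
  · rw [if_pos (show (256:Int) ≤ ram by omega), if_neg (show ¬ ram < (256:Int) by omega), if_pos (show (512:Int) ≤ ram by omega), if_neg (show ¬ ram < (512:Int) by omega), if_pos (show (1024:Int) ≤ ram by omega), if_neg (show ¬ ram < (1024:Int) by omega), if_pos (show (2048:Int) ≤ ram by omega), if_neg (show ¬ ram < (2048:Int) by omega), if_pos (show (3072:Int) ≤ ram by omega), if_neg (show ¬ ram < (3072:Int) by omega), if_pos (show (4096:Int) ≤ ram by omega), if_neg (show ¬ ram < (4096:Int) by omega), if_pos (show (6144:Int) ≤ ram by omega), if_neg (show ¬ ram < (6144:Int) by omega), if_neg (show ¬ (8192:Int) ≤ ram by omega), if_pos (show ram < (8192:Int) by omega)]; norm_num [List.getD]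
  rw [if_pos (show (256:Int) ≤ ram by omega), if_neg (show ¬ ram < (256:Int) by omega), if_pos (show (512:Int) ≤ ram by omega), if_neg (show ¬ ram < (512:Int) by omega), if_pos (show (1024:Int) ≤ ram by omega), if_neg (show ¬ ram < (1024:Int) by omega), if_pos (show (2048:Int) ≤ ram by omega), if_neg (show ¬ ram < (2048:Int) by omega), if_pos (show (3072:Int) ≤ ram by omega), if_neg (show ¬ ram < (3072:Int) by omega), if_pos (show (4096:Int) ≤ ram by omega), if_neg (show ¬ ram < (4096:Int) by omega), if_pos (show (6144:Int) ≤ ram by omega), if_neg (show ¬ ram < (6144:Int) by omega), if_pos (show (8192:Int) ≤ ram by omega), if_neg (show ¬ ram < (8192:Int) by omega)]; norm_num [List.getD]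

lemma pv_get?_table_none (m : String) (h1 : m ≠ "parakeet-v2") (h2 : m ≠ "whisper-large-v3")
    (h3 : m ≠ "whisper-large-v3-turbo") :
    PySem.Dict.get? pvCHUNK_DURATION_TABLE m = none := by
  rw [show pvCHUNK_DURATION_TABLE = PySem.Dict.mk [("parakeet-v2", pvTableParakeet), ("whisper-large-v3", pvTableV3), ("whisper-large-v3-turbo", pvTableTurbo)] from by decide]
  simp [PySem.Dict.get?, Ne.symm h1, Ne.symm h2, Ne.symm h3]

lemma pv_get?_durs_none (m : String) (h1 : m ≠ "parakeet-v2") (h2 : m ≠ "whisper-large-v3")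
    (h3 : m ≠ "whisper-large-v3-turbo") :
    PySem.Dict.get? pvDurationsDict m = none := by
  rw [show pvDurationsDict = PySem.Dict.mk [("parakeet-v2", [(90:Int), 120, 180, 300, 420, 600, 900, 1200]), ("whisper-large-v3", [60, 90, 120, 120, 120, 120, 150, 180]), ("whisper-large-v3-turbo", [90, 120, 180, 300, 420, 600, 900, 1200])] from by decide]
  simp [PySem.Dict.get?, Ne.symm h1, Ne.symm h2, Ne.symm h3]

-- ===== VERDICT (by name: the statement is the Claim_ definition above) =====
theorem lookup_chunk_duration_spec : Claim_equal_lookup_chunk_duration := by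
  intro ram model _
  unfold Spec_lookup_chunk_duration
  simp only [lookup_chunk_duration, lookup_chunk_duration_alt]
  by_cases h1 : model = "parakeet-v2"
  · subst h1
    rw [show PySem.Dict.get? pvCHUNK_DURATION_TABLE "parakeet-v2" = some pvTableParakeet from by decide,
        show PySem.Dict.get? pvDurationsDict "parakeet-v2" = some [(90:Int),120,180,300,420,600,900,1200] from by decide]
    simp only [Option.getD_some]
    rw [show PySem.List.sorted2 pvTableParakeet.items Prod.fst Prod.snd = [((256:Int),(90:Int)),(512,120),(1024,180),(2048,300),(3072,420),(4096,600),(6144,900),(8192,1200)] from by decide]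
    exact pv_eq_on_table ram 90 120 180 300 420 600 900 1200
  · by_cases h2 : model = "whisper-large-v3"
    · subst h2
      rw [show PySem.Dict.get? pvCHUNK_DURATION_TABLE "whisper-large-v3" = some pvTableV3 from by decide,
          show PySem.Dict.get? pvDurationsDict "whisper-large-v3" = some [(60:Int),90,120,120,120,120,150,180] from by decide]
      simp only [Option.getD_some]
      rw [show PySem.List.sorted2 pvTableV3.items Prod.fst Prod.snd = [((256:Int),(60:Int)),(512,90),(1024,120),(2048,120),(3072,120),(4096,120),(6144,150),(8192,180)] from by decide]
      exact pv_eq_on_table ram 60 90 120 120 120 120 150 180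
    · by_cases h3 : model = "whisper-large-v3-turbo"
      · subst h3
        rw [show PySem.Dict.get? pvCHUNK_DURATION_TABLE "whisper-large-v3-turbo" = some pvTableTurbo from by decide,
            show PySem.Dict.get? pvDurationsDict "whisper-large-v3-turbo" = some [(90:Int),120,180,300,420,600,900,1200] from by decide]
        simp only [Option.getD_some]
        rw [show PySem.List.sorted2 pvTableTurbo.items Prod.fst Prod.snd = [((256:Int),(90:Int)),(512,120),(1024,180),(2048,300),(3072,420),(4096,600),(6144,900),(8192,1200)] from by decide]
        exact pv_eq_on_table ram 90 120 180 300 420 600 900 1200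
      · rw [pv_get?_table_none model h1 h2 h3, pv_get?_durs_none model h1 h2 h3]
        simp only [Option.getD_none]
        rw [show PySem.Dict.get? pvCHUNK_DURATION_TABLE "parakeet-v2" = some pvTableParakeet from by decide,
            show PySem.Dict.get? pvDurationsDict "parakeet-v2" = some [(90:Int),120,180,300,420,600,900,1200] from by decide]
        simp only [Option.getD_some]
        rw [show PySem.List.sorted2 pvTableParakeet.items Prod.fst Prod.snd = [((256:Int),(90:Int)),(512,120),(1024,180),(2048,300),(3072,420),(4096,600),(6144,900),(8192,1200)] from by decide]
        exact pv_eq_on_table ram 90 120 180 300 420 600 900 1200
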